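-- pv_equiv track=rewrite | github.com/Abpattar/Python_Programming | VerseOrVibe.py | analyze_genres
-- ===== SOURCE A (Python) =====
-- INSTRUMENTAL_GENRES = [
--     'ambient', 'classical', 'instrumental', 'soundtrack', 'score',
--     'new age', 'meditation', 'nature sounds', 'white noise',
--     'jazz fusion', 'smooth jazz instrumental', 'classical crossover',
--     'post-rock', 'math rock', 'experimental', 'drone',
--     'minimal techno', 'deep house instrumental', 'trance instrumental',
--     'lo-fi beats', 'chillhop', 'downtempo', 'trip-hop instrumental'
-- ]
--
-- VOCAL_GENRES = [
--     'pop', 'rock', 'hip hop', 'rap', 'r&b', 'soul', 'funk', 'disco',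
--     'country', 'folk', 'indie pop', 'indie rock', 'alternative',
--     'punk', 'metal', 'blues', 'reggae', 'ska', 'gospel',
--     'singer-songwriter', 'acoustic pop', 'vocal jazz', 'cabaret'
-- ]
--
-- def analyze_genres(artist_info_list):
--     """Analyze artist genres to determine instrumental likelihood"""
--     if not artist_info_list:
--         return 0, []
--
--     all_genres = []
--     for artist_info in artist_info_list:
--         if artist_info and 'genres' in artist_info:
--             all_genres.extend([genre.lower() for genre in artist_info['genres']])
--
--     if not all_genres:
--         return 0, ["No genre information available"]
--
--     score = 0
--     reasons = []
--
--     # Check for instrumental genres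
--     instrumental_matches = [genre for genre in all_genres if any(inst_genre in genre for inst_genre in INSTRUMENTAL_GENRES)]
--     if instrumental_matches:
--         score += len(instrumental_matches) * 2
--         reasons.append(f"Instrumental genres found: {', '.join(instrumental_matches[:3])}...")
--
--     # Check for vocal genres
--     vocal_matches = [genre for genre in all_genres if any(vocal_genre in genre for vocal_genre in VOCAL_GENRES)]
--     if vocal_matches:
--         score -= len(vocal_matches)
--         reasons.append(f"Vocal genres found: {', '.join(vocal_matches[:3])}...")
--
--     return score, reasons
-- ===== SOURCE B (Python) =====
-- INSTRUMENTAL_GENRES = [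
--     'ambient', 'classical', 'instrumental', 'soundtrack', 'score',
--     'new age', 'meditation', 'nature sounds', 'white noise',
--     'jazz fusion', 'smooth jazz instrumental', 'classical crossover',
--     'post-rock', 'math rock', 'experimental', 'drone',
--     'minimal techno', 'deep house instrumental', 'trance instrumental',
--     'lo-fi beats', 'chillhop', 'downtempo', 'trip-hop instrumental'
-- ]
--
-- VOCAL_GENRES = [
--     'pop', 'rock', 'hip hop', 'rap', 'r&b', 'soul', 'funk', 'disco',
--     'country', 'folk', 'indie pop', 'indie rock', 'alternative',
--     'punk', 'metal', 'blues', 'reggae', 'ska', 'gospel',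
--     'singer-songwriter', 'acoustic pop', 'vocal jazz', 'cabaret'
-- ]
--
-- def analyze_genres(artist_info_list):
--     """Analyze artist genres to determine instrumental likelihood (single pass)"""
--     if not artist_info_list:
--         return 0, []
--
--     found = False
--     inst_count = 0
--     voc_count = 0
--     inst_top = []   # at most the first 3 instrumental matches
--     voc_top = []    # at most the first 3 vocal matches
--     for artist_info in artist_info_list:
--         if artist_info and 'genres' in artist_info:
--             for genre in artist_info['genres']:
--                 g = genre.lower()
--                 found = True
--                 if any(s in g for s in INSTRUMENTAL_GENRES):
--                     inst_count += 1
--                     if len(inst_top) < 3: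
--                         inst_top.append(g)
--                 if any(s in g for s in VOCAL_GENRES):
--                     voc_count += 1
--                     if len(voc_top) < 3:
--                         voc_top.append(g)
--
--     if not found:
--         return 0, ["No genre information available"]
--
--     score = inst_count * 2 - voc_count
--     reasons = []
--     if inst_count:
--         reasons.append(f"Instrumental genres found: {', '.join(inst_top)}...")
--     if voc_count:
--         reasons.append(f"Vocal genres found: {', '.join(voc_top)}...")
--     return score, reasons
-- ===== Notes on version B (the rewrite author's own statement) =====
-- stated objective: alternative
-- what changed: B replaces A's three list passes (collect all lowered genres, then two separate filtering comprehensions over that list) by a single fused pass over the artists' genres that maintains counts and only the first three instrumental/vocal matches, assembling the same score and reason strings from that state.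
import Mathlib
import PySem

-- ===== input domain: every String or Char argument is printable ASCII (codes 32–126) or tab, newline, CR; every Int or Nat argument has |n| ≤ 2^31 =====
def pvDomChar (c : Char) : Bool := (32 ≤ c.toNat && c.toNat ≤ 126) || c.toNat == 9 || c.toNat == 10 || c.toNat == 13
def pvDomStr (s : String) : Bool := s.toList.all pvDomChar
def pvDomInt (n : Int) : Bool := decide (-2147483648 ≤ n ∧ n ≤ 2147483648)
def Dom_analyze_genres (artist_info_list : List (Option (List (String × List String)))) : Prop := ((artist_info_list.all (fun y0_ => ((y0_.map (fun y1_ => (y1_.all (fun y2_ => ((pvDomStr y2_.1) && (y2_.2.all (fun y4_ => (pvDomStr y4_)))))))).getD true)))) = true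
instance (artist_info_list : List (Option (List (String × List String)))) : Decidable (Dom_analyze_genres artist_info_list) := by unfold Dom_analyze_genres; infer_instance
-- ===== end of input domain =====

-- B fuses A's three passes (collect all genres, filter instrumental, filter vocal) into one
-- pass that maintains counts and the first three matches of each kind; same return value (alternative/simpler single-pass decomposition).

-- shared module constants
def INSTRUMENTAL_GENRES : List String :=
  ["ambient", "classical", "instrumental", "soundtrack", "score",
   "new age", "meditation", "nature sounds", "white noise",
   "jazz fusion", "smooth jazz instrumental", "classical crossover",
   "post-rock", "math rock", "experimental", "drone",
   "minimal techno", "deep house instrumental", "trance instrumental",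
   "lo-fi beats", "chillhop", "downtempo", "trip-hop instrumental"]

def VOCAL_GENRES : List String :=
  ["pop", "rock", "hip hop", "rap", "r&b", "soul", "funk", "disco",
   "country", "folk", "indie pop", "indie rock", "alternative",
   "punk", "metal", "blues", "reggae", "ska", "gospel",
   "singer-songwriter", "acoustic pop", "vocal jazz", "cabaret"]

-- any(s in g for s inL)
def agInstP (g : String) : Bool := INSTRUMENTAL_GENRES.any (fun s => PySem.Str.isIn s g)
def agVocP (g : String) : Bool := VOCAL_GENRES.any (fun s => PySem.Str.isIn s g)

-- artist_info['genres'] as first-match association-list lookup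
def agLookup (d : List (String × List String)) : Option (List String) :=
  (d.find? (fun kv => kv.1 == "genres")).map (·.2)

-- ===== PORT A =====
def analyze_genres (artist_info_list : List (Option (List (String × List String)))) : Int × List String :=
  if artist_info_list.isEmpty then (0, [])
  else
    let all_genres : List String :=
      artist_info_list.foldl (fun acc ai =>
        match ai with
        | none => acc
        | some d =>
          if !d.isEmpty && (agLookup d).isSome then
            acc ++ ((agLookup d).getD []).map PySem.Str.lower
          else acc) []
    if all_genres.isEmpty then (0, ["No genre information available"])
    else
      let instrumental_matches := all_genres.filter agInstP
      let vocal_matches := all_genres.filter agVocP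
      let score : Int := 0
      let reasons : List String := []
      let sr1 : Int × List String :=
        if !instrumental_matches.isEmpty then
          (score + (instrumental_matches.length : Int) * 2,
           reasons ++ ["Instrumental genres found: " ++ PySem.Str.join ", " (instrumental_matches.take 3) ++ "..."])
        else (score, reasons)
      let sr2 : Int × List String :=
        if !vocal_matches.isEmpty then
          (sr1.1 - (vocal_matches.length : Int),
           sr1.2 ++ ["Vocal genres found: " ++ PySem.Str.join ", " (vocal_matches.take 3) ++ "..."])
        else sr1
      sr2

-- ===== PORT B =====
structure AGState where
  found : Bool
  ic : Int
  vc : Int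
  itop : List String
  vtop : List String
deriving Repr, DecidableEq

def agStep (st : AGState) (genre : String) : AGState :=
  let g := PySem.Str.lower genre
  let st1 : AGState := { st with found := true }
  let st2 : AGState :=
    if agInstP g then
      { st1 with ic := st1.ic + 1,
                 itop := if st1.itop.length < 3 then st1.itop ++ [g] else st1.itop }
    else st1
  if agVocP g then
    { st2 with vc := st2.vc + 1,
               vtop := if st2.vtop.length < 3 then st2.vtop ++ [g] else st2.vtop }
  else st2

def analyze_genres_alt (artist_info_list : List (Option (List (String × List String)))) : Int × List String :=
  if artist_info_list.isEmpty then (0, [])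
  else
    let st : AGState :=
      artist_info_list.foldl (fun st ai =>
        match ai with
        | none => st
        | some d =>
          if !d.isEmpty && (agLookup d).isSome then
            ((agLookup d).getD []).foldl agStep st
          else st) ⟨false, 0, 0, [], []⟩
    if !st.found then (0, ["No genre information available"])
    else
      let score := st.ic * 2 - st.vc
      let reasons : List String := []
      let reasons :=
        if st.ic != 0 then
          reasons ++ ["Instrumental genres found: " ++ PySem.Str.join ", " st.itop ++ "..."]
        else reasons
      let reasons :=
        if st.vc != 0 then
          reasons ++ ["Vocal genres found: " ++ PySem.Str.join ", " st.vtop ++ "..."]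
        else reasons
      (score, reasons)

-- ===== PRECONDITION & SPEC =====
def Spec_analyze_genres (artist_info_list : List (Option (List (String × List String)))) (out : Int × List String) : Prop := out = analyze_genres_alt artist_info_list
instance (artist_info_list : List (Option (List (String × List String)))) (out : Int × List String) : Decidable (Spec_analyze_genres artist_info_list out) := by unfold Spec_analyze_genres; infer_instance

-- ===== CLAIM (what is proved, stated in full; the proofs are below) =====
def Claim_equal_analyze_genres : Prop := ∀ (artist_info_list : List (Option (List (String × List String)))), Dom_analyze_genres artist_info_list → Spec_analyze_genres artist_info_list (analyze_genres artist_info_list)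

-- ===== LEMMAS AND PROOFS =====

-- the abstraction: B's fold state, expressed from A's all_genres-so-far
def agMk (all : List String) : AGState :=
  ⟨!all.isEmpty, (all.countP agInstP : Int), (all.countP agVocP : Int),
   (all.filter agInstP).take 3, (all.filter agVocP).take 3⟩

theorem take3_append (l : List String) (g : String) :
    (l ++ [g]).take 3 = if l.length < 3 then l.take 3 ++ [g] else l.take 3 := by
  rw [List.take_append]
  split_ifs with h
  · have : (3 - l.length) = (3 - l.length - 1) + 1 := by omega
    rw [this]; simp [List.take_succ_cons]
  · have : (3 - l.length) = 0 := by omega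
    rw [this]; simp

theorem agStep_mk (all : List String) (genre : String) :
    agStep (agMk all) genre = agMk (all ++ [PySem.Str.lower genre]) := by
  unfold agStep
  generalize PySem.Str.lower genre = g
  cases hi : agInstP g <;> cases hv : agVocP g <;>
    simp [agMk, hi, hv, take3_append, List.countP_append, List.filter_append]

theorem agFoldGs (gs : List String) (all : List String) :
    gs.foldl agStep (agMk all) = agMk (all ++ gs.map PySem.Str.lower) := by
  induction gs generalizing all with
  | nil => simp
  | cons g t ih =>
    simp only [List.foldl_cons, agStep_mk, List.map_cons]
    rw [ih]
    simp

theorem agFoldOuter (ais : List (Option (List (String × List String)))) (all : List String) :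
    (ais.foldl (fun st ai =>
        match ai with
        | none => st
        | some d =>
          if !d.isEmpty && (agLookup d).isSome then
            ((agLookup d).getD []).foldl agStep st
          else st) (agMk all))
    = agMk (ais.foldl (fun acc ai =>
        match ai with
        | none => acc
        | some d =>
          if !d.isEmpty && (agLookup d).isSome then
            acc ++ ((agLookup d).getD []).map PySem.Str.lower
          else acc) all) := by
  induction ais generalizing all with
  | nil => rfl
  | cons ai t ih =>
    cases ai with
    | none => simpa using ih all
    | some d =>
      by_cases h : (!d.isEmpty && (agLookup d).isSome) = true
      · simp only [List.foldl_cons, h, if_pos, agFoldGs]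
        exact ih _
      · simp only [List.foldl_cons, if_neg h]
        exact ih all

-- ===== VERDICT (by name: the statement is the Claim_ definition above) =====
theorem analyze_genres_spec : Claim_equal_analyze_genres := by
  intro ais _
  unfold Spec_analyze_genres analyze_genres analyze_genres_alt
  by_cases he : ais.isEmpty
  · simp [he]
  · simp only [he, if_neg, Bool.false_eq_true, not_false_eq_true]
    rw [show ({ found := false, ic := 0, vc := 0, itop := [], vtop := [] } : AGState) = agMk [] from rfl,
        agFoldOuter ais []]
    set all := (ais.foldl (fun acc ai =>
        match ai with
        | none => acc
        | some d =>
          if !d.isEmpty && (agLookup d).isSome then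
            acc ++ ((agLookup d).getD []).map PySem.Str.lower
          else acc) []) with hall
    by_cases hemp : all.isEmpty
    · simp [agMk, hemp]
    · simp only [agMk, hemp, Bool.not_false, if_neg, Bool.false_eq_true, not_false_eq_true,
        List.countP_eq_length_filter]
      by_cases h1 : ∃ x ∈ all, agInstP x = true <;> by_cases h2 : ∃ x ∈ all, agVocP x = true
      · simp [h1, h2]
      · have e2 : all.filter agVocP = [] := List.filter_eq_nil_iff.mpr (by simpa using h2)
        simp [h1, e2]
      · have e1 : all.filter agInstP = [] := List.filter_eq_nil_iff.mpr (by simpa using h1)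
        simp [h2, e1]
      · have e1 : all.filter agInstP = [] := List.filter_eq_nil_iff.mpr (by simpa using h1)
        have e2 : all.filter agVocP = [] := List.filter_eq_nil_iff.mpr (by simpa using h2)
        simp [e1, e2]
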